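-- pv_equiv track=rewrite | github.com/RiddhiR2019/sentimennt-analyzer | backend/sentiment/analyzer.py | is_negated
-- ===== SOURCE A (Python) =====
-- def is_negated(word: str, tokens: list) -> bool:
--     """Check if a sentiment word is preceded by negation within a token window."""
--     negation_tokens = {
--         'not', 'no', 'never', "don't", "doesn't", "didn't", 'hardly',
--         'rarely', "can't", 'cannot', "isn't", "wasn't", "aren't", "weren't"
--     }
--     try:
--         word_idx = tokens.index(word)
--         window_start = max(0, word_idx - 4)
--         window = tokens[window_start:word_idx]
--         return any(token in negation_tokens for token in window)
--     except ValueError: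
--         return False
-- ===== SOURCE B (Python) =====
-- def is_negated(word: str, tokens: list) -> bool:
--     """Check if a sentiment word is preceded by negation within a token window."""
--     negation_tokens = {
--         'not', 'no', 'never', "don't", "doesn't", "didn't", 'hardly',
--         'rarely', "can't", 'cannot', "isn't", "wasn't", "aren't", "weren't"
--     }
--     recent = []
--     for token in tokens:
--         if token == word:
--             return any(t in negation_tokens for t in recent)
--         recent.append(token)
--         if len(recent) > 4:
--             recent.pop(0)
--     return False
-- ===== Notes on version B (the rewrite author's own statement) =====
-- stated objective: simpler
-- what changed: Replaces locate-then-backward-slice (tokens.index plus tokens[max(0,i-4):i]) with a single forward scan that maintains a sliding window of the last <=4 tokens and answers at the first occurrence of word.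
import Mathlib
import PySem

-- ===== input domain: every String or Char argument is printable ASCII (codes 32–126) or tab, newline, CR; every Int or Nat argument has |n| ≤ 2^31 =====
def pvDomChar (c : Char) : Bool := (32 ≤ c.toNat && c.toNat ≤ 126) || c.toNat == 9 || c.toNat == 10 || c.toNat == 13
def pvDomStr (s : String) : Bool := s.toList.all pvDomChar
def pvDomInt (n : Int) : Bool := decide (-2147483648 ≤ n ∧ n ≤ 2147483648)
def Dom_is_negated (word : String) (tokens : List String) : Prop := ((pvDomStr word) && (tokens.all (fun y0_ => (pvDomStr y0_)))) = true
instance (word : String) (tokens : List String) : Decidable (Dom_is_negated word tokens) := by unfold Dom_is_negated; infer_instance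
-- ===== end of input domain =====

-- B replaces locate-then-backward-slice by a single forward scan that keeps the last ≤4 seen tokens (objective: simpler).

-- ===== PORT A =====
-- the negation_tokens set (membership only, so a list of its distinct elements)
def negTokens : List String :=
  ["not", "no", "never", "don't", "doesn't", "didn't", "hardly",
   "rarely", "can't", "cannot", "isn't", "wasn't", "aren't", "weren't"]

def is_negated (word : String) (tokens : List String) : Bool :=
  match PySem.List.index? tokens word with
  | none => false          -- ValueError branch
  | some word_idx =>
      let window_start : Int := max 0 ((word_idx : Int) - 4)
      let window := PySem.List.slice tokens (some window_start) (some (word_idx : Int))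
      window.any (fun token => negTokens.contains token)

-- ===== PORT B =====
-- append the token, then drop the front if the window exceeds 4 (list.append + pop(0))
def pushWin (recent : List String) (t : String) : List String :=
  let r := recent ++ [t]
  if r.length > 4 then r.drop 1 else r

def altLoop (word : String) (recent : List String) : List String → Bool
  | [] => false
  | t :: rest =>
      if t == word then recent.any (fun x => negTokens.contains x)
      else altLoop word (pushWin recent t) rest

def is_negated_alt (word : String) (tokens : List String) : Bool :=
  altLoop word [] tokens

-- ===== PRECONDITION & SPEC =====
def Spec_is_negated (word : String) (tokens : List String) (out : Bool) : Prop := out = is_negated_alt word tokens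
instance (word : String) (tokens : List String) (out : Bool) : Decidable (Spec_is_negated word tokens out) := by unfold Spec_is_negated; infer_instance

-- ===== CLAIM (what is proved, stated in full; the proofs are below) =====
def Claim_equal_is_negated : Prop := ∀ (word : String) (tokens : List String), Dom_is_negated word tokens → Spec_is_negated word tokens (is_negated word tokens)

-- ===== LEMMAS AND PROOFS =====

-- dropping to the last 4 elements ignores a prepended head once the tail already has >= 4 elements
theorem drop_last4_cons (a : String) (l : List String) (h : 4 <= l.length) :
    (a :: l).drop ((a :: l).length - 4) = l.drop (l.length - 4) := by
  have h1 : (a :: l).length - 4 = (l.length - 4) + 1 := by simp; omega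
  rw [h1, List.drop_succ_cons]

-- the loop invariant: altLoop on the remaining tokens computes the A-shaped answer for
-- the window 'last <=4 of (recent ++ prefix before the first match)'
theorem altLoop_eq (word : String) :
    ∀ (tokens recent : List String), recent.length <= 4 →
      altLoop word recent tokens =
        match PySem.List.index? tokens word with
        | none => false
        | some i =>
            ((recent ++ tokens.take i).drop ((recent ++ tokens.take i).length - 4)).any
              (fun x => negTokens.contains x) := by
  intro tokens
  induction tokens with
  | nil =>
      intro recent _
      simp [altLoop, PySem.List.index?_eq_idxOf?, List.idxOf?]
  | cons t rest ih =>
      intro recent hlen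
      by_cases ht : t = word
      · subst ht
        rw [PySem.List.index?_cons_self]
        have h0 : recent.length - 4 = 0 := by omega
        simp [altLoop, h0]
      · have hne : (t == word) = false := by simp [ht]
        rw [PySem.List.index?_cons_of_ne rest ht]
        have hpw : (pushWin recent t).length <= 4 := by
          simp only [pushWin, List.length_append, List.length_cons]
          split
          · simp only [List.length_drop, List.length_append, List.length_cons, List.length_nil]; omega
          · simp only [List.length_append, List.length_cons, List.length_nil]; omega
        simp only [altLoop, hne, Bool.false_eq_true, if_false]
        rw [ih (pushWin recent t) hpw]
        cases hidx : PySem.List.index? rest word with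
        | none => simp
        | some j =>
            simp only [Option.map_some, List.take_succ_cons]
            by_cases h4 : recent.length = 4
            · -- window full: pushWin drops the oldest element, which lies outside the last 4 anyway
              obtain ⟨a, rr, rfl⟩ : ∃ a rr, recent = a :: rr := by
                cases recent with
                | nil => simp at h4
                | cons a rr => exact ⟨a, rr, rfl⟩
              have hrr : rr.length = 3 := by simpa using h4
              have hpw2 : pushWin (a :: rr) t = rr ++ [t] := by
                simp [pushWin, hrr]
              rw [hpw2]
              have hass : (a :: rr) ++ t :: rest.take j = a :: ((rr ++ [t]) ++ rest.take j) := by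
                simp
              rw [hass, drop_last4_cons _ _ (by simp [hrr]; omega)]
            · -- window not yet full: pushWin is a plain append
              have hpw2 : pushWin recent t = recent ++ [t] := by
                simp only [pushWin, List.length_append, List.length_cons]
                rw [if_neg (by simp; omega)]
              rw [hpw2]
              simp

-- ===== VERDICT (by name: the statement is the Claim_ definition above) =====
theorem is_negated_spec : Claim_equal_is_negated := by
  intro word tokens _
  unfold Spec_is_negated is_negated is_negated_alt
  rw [altLoop_eq word tokens [] (by simp)]
  cases hidx : PySem.List.index? tokens word with
  | none => rfl
  | some i =>
      obtain ⟨hk, -, -⟩ := PySem.List.getElem_of_index?_eq_some hidx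
      have ha : (0:Int) <= max 0 ((i:Int) - 4) := le_max_left 0 _
      have hb : (0:Int) <= (i:Int) := Int.natCast_nonneg i
      dsimp only
      rw [PySem.List.slice_toNat tokens ha hb]
      have h1 : (max 0 ((i:Int) - 4)).toNat = i - 4 := by omega
      have h2 : ((i : Int)).toNat = i := by omega
      rw [h1, h2]
      have h3 : ([] ++ tokens.take i : List String) = tokens.take i := by simp
      have hlen : (tokens.take i).length = i := by simp; omega
      rw [h3, hlen, List.drop_take]
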